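-- pv_equiv track=rewrite | github.com/adhishpawar/TimesheetPA | bot/app/timesheet_flow.py | _normalize_task_type
-- ===== SOURCE A (Python) =====
-- def _normalize_task_type(task_type: str) -> str:
--     """
--     Normalize task type to standard format
--
--     Args:
--         task_type: Raw task type string
--
--     Returns:
--         Normalized task type (e.g., "Testing", "Development")
--     """
--     if not task_type:
--         return "Unknown"
--
--     lower = task_type.lower().strip()
--
--     # Map variations to standard types
--     mapping = {
--         "development": ["development", "dev", "coding", "programming"],
--         "testing": ["testing", "test", "qa", "quality assurance"],
--         "debugging": ["debugging", "debug", "bugfix", "bug fixing"],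
--         "meeting": ["meeting", "discussion", "call"],
--         "research": ["research", "investigation", "analysis"],
--         "documentation": ["documentation", "docs", "writing"],
--         "devops": ["devops", "deployment", "ci/cd", "pipeline"]
--     }
--
--     for standard, variations in mapping.items():
--         if lower in variations:
--             return standard.capitalize()
--
--     return task_type.capitalize()
-- ===== SOURCE B (Python) =====
-- _REVERSE = {
--     "development": "Development", "dev": "Development",
--     "coding": "Development", "programming": "Development",
--     "testing": "Testing", "test": "Testing",
--     "qa": "Testing", "quality assurance": "Testing",
--     "debugging": "Debugging", "debug": "Debugging",
--     "bugfix": "Debugging", "bug fixing": "Debugging",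
--     "meeting": "Meeting", "discussion": "Meeting", "call": "Meeting",
--     "research": "Research", "investigation": "Research", "analysis": "Research",
--     "documentation": "Documentation", "docs": "Documentation", "writing": "Documentation",
--     "devops": "Devops", "deployment": "Devops", "ci/cd": "Devops", "pipeline": "Devops",
-- }
--
--
-- def _normalize_task_type(task_type: str) -> str:
--     if not task_type:
--         return "Unknown"
--     return _REVERSE.get(task_type.lower().strip(), task_type.capitalize())
-- ===== Notes on version B (the rewrite author's own statement) =====
-- stated objective: idiomatic
-- what changed: B precomputes a flat reverse-lookup dict from every variation directly to its capitalized standard label, replacing A's per-call loop over categories and inner membership scans with a single dict .get with a capitalize default.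
import Mathlib
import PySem

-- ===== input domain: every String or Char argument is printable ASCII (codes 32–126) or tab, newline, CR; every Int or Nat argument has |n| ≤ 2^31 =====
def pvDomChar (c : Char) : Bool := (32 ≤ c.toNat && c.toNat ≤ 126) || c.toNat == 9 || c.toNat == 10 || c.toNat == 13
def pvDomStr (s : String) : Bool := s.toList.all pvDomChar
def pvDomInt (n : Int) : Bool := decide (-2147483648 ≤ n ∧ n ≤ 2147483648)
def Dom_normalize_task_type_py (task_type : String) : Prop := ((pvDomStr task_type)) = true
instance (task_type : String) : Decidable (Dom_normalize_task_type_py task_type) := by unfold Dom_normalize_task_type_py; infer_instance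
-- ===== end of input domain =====

-- B replaces A's per-call loop over categories (with inner membership scans) by a single
-- lookup in a precomputed flat reverse dict mapping each variation to its capitalized label.

-- str.capitalize(): first char uppercased, rest lowercased (exact on the ASCII domain,
-- where Python's titlecase of the first char coincides with uppercase).
def pyCapitalize (s : String) : String :=
  match s.toList with
  | [] => s
  | c :: cs => String.ofList (PySem.Chars.upperChar c :: PySem.Chars.lower cs)

-- ===== PORT A =====
-- the literal `mapping` dict of A, as its items in insertion order
def pvMappingA : List (String × List String) :=
  [("development", ["development", "dev", "coding", "programming"]),
   ("testing", ["testing", "test", "qa", "quality assurance"]),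
   ("debugging", ["debugging", "debug", "bugfix", "bug fixing"]),
   ("meeting", ["meeting", "discussion", "call"]),
   ("research", ["research", "investigation", "analysis"]),
   ("documentation", ["documentation", "docs", "writing"]),
   ("devops", ["devops", "deployment", "ci/cd", "pipeline"])]

-- the `for standard, variations in mapping.items()` loop; none = fell through
def pvLoopA : List (String × List String) → String → Option String
  | [], _ => none
  | (standard, variations) :: rest, lower =>
      if lower ∈ variations then some (pyCapitalize standard) else pvLoopA rest lower

def normalize_task_type_py (task_type : String) : String :=
  if task_type = "" then "Unknown"
  else
    let lower := PySem.Str.strip (PySem.Str.lower task_type)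
    match pvLoopA pvMappingA lower with
    | some r => r
    | none => pyCapitalize task_type

-- ===== PORT B =====
def pvReverseB : PySem.Dict String String :=
  PySem.Dict.ofList
    [("development", "Development"), ("dev", "Development"),
     ("coding", "Development"), ("programming", "Development"),
     ("testing", "Testing"), ("test", "Testing"),
     ("qa", "Testing"), ("quality assurance", "Testing"),
     ("debugging", "Debugging"), ("debug", "Debugging"),
     ("bugfix", "Debugging"), ("bug fixing", "Debugging"),
     ("meeting", "Meeting"), ("discussion", "Meeting"), ("call", "Meeting"),
     ("research", "Research"), ("investigation", "Research"), ("analysis", "Research"),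
     ("documentation", "Documentation"), ("docs", "Documentation"), ("writing", "Documentation"),
     ("devops", "Devops"), ("deployment", "Devops"), ("ci/cd", "Devops"), ("pipeline", "Devops")]

def normalize_task_type_py_alt (task_type : String) : String :=
  if task_type = "" then "Unknown"
  else
    pvReverseB.getD (PySem.Str.strip (PySem.Str.lower task_type)) (pyCapitalize task_type)

-- ===== PRECONDITION & SPEC =====
def Spec_normalize_task_type_py (task_type : String) (out : String) : Prop := out = normalize_task_type_py_alt task_type
instance (task_type : String) (out : String) : Decidable (Spec_normalize_task_type_py task_type out) := by unfold Spec_normalize_task_type_py; infer_instance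

-- ===== CLAIM (what is proved, stated in full; the proofs are below) =====
def Claim_equal_normalize_task_type_py : Prop := ∀ (task_type : String), Dom_normalize_task_type_py task_type → Spec_normalize_task_type_py task_type (normalize_task_type_py task_type)

-- ===== LEMMAS AND PROOFS =====

theorem pvReverseB_items :
    pvReverseB.items =
    [("development", "Development"), ("dev", "Development"),
     ("coding", "Development"), ("programming", "Development"),
     ("testing", "Testing"), ("test", "Testing"),
     ("qa", "Testing"), ("quality assurance", "Testing"),
     ("debugging", "Debugging"), ("debug", "Debugging"),
     ("bugfix", "Debugging"), ("bug fixing", "Debugging"),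
     ("meeting", "Meeting"), ("discussion", "Meeting"), ("call", "Meeting"),
     ("research", "Research"), ("investigation", "Research"), ("analysis", "Research"),
     ("documentation", "Documentation"), ("docs", "Documentation"), ("writing", "Documentation"),
     ("devops", "Devops"), ("deployment", "Devops"), ("ci/cd", "Devops"), ("pipeline", "Devops")] := by
  decide

-- A's category loop computes exactly B's reverse-dict lookup, for any key string
theorem pvLoop_eq_lookup (l : String) :
    pvLoopA pvMappingA l = pvReverseB.get? l := by
  by_cases h1 : l = "development"
  · subst h1; decide
  by_cases h2 : l = "dev"
  · subst h2; decide
  by_cases h3 : l = "coding"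
  · subst h3; decide
  by_cases h4 : l = "programming"
  · subst h4; decide
  by_cases h5 : l = "testing"
  · subst h5; decide
  by_cases h6 : l = "test"
  · subst h6; decide
  by_cases h7 : l = "qa"
  · subst h7; decide
  by_cases h8 : l = "quality assurance"
  · subst h8; decide
  by_cases h9 : l = "debugging"
  · subst h9; decide
  by_cases h10 : l = "debug"
  · subst h10; decide
  by_cases h11 : l = "bugfix"
  · subst h11; decide
  by_cases h12 : l = "bug fixing"
  · subst h12; decide
  by_cases h13 : l = "meeting"
  · subst h13; decide
  by_cases h14 : l = "discussion"
  · subst h14; decide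
  by_cases h15 : l = "call"
  · subst h15; decide
  by_cases h16 : l = "research"
  · subst h16; decide
  by_cases h17 : l = "investigation"
  · subst h17; decide
  by_cases h18 : l = "analysis"
  · subst h18; decide
  by_cases h19 : l = "documentation"
  · subst h19; decide
  by_cases h20 : l = "docs"
  · subst h20; decide
  by_cases h21 : l = "writing"
  · subst h21; decide
  by_cases h22 : l = "devops"
  · subst h22; decide
  by_cases h23 : l = "deployment"
  · subst h23; decide
  by_cases h24 : l = "ci/cd"
  · subst h24; decide
  by_cases h25 : l = "pipeline"
  · subst h25; decide
  have e : ∀ a : String, ¬ l = a → (a == l) = false :=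
    fun a h => beq_eq_false_iff_ne.mpr (fun he => h he.symm)
  simp [pvLoopA, pvMappingA, PySem.Dict.get?, pvReverseB_items, List.find?, h1, h2, h3, h4, h5, h6, h7, h8, h9, h10, h11, h12, h13, h14, h15, h16, h17, h18, h19, h20, h21, h22, h23, h24, h25, e _ h1, e _ h2, e _ h3, e _ h4, e _ h5, e _ h6, e _ h7, e _ h8, e _ h9, e _ h10, e _ h11, e _ h12, e _ h13, e _ h14, e _ h15, e _ h16, e _ h17, e _ h18, e _ h19, e _ h20, e _ h21, e _ h22, e _ h23, e _ h24, e _ h25]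

-- ===== VERDICT (by name: the statement is the Claim_ definition above) =====
theorem normalize_task_type_py_spec : Claim_equal_normalize_task_type_py := by
  intro t _
  unfold Spec_normalize_task_type_py normalize_task_type_py normalize_task_type_py_alt
  by_cases h : t = ""
  · simp [h]
  · simp only [h, if_false]
    rw [pvLoop_eq_lookup, PySem.Dict.getD]
    cases pvReverseB.get? (PySem.Str.strip (PySem.Str.lower t)) <;> rfl
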